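-- pv_equiv track=rewrite | github.com/yunhyeeun/dailycoding | stack-queue.py | laser
-- ===== SOURCE A (Python) =====
-- def laser(arrangement):
--     laser = arrangement.replace("()", ".")
--     print (laser)
--     answer = 0
--     stick = 0
--     for e in laser:
--         if e == "(":
--             stick += 1
--         elif e == ")":
--             answer += 1
--             stick -= 1
--         else:
--             answer += stick
--     return answer
-- ===== SOURCE B (Python) =====
-- def laser(arrangement):
--     print(arrangement.replace("()", "."))
--     answer = 0
--     stick = 0
--     i = 0
--     n = len(arrangement)
--     while i < n:
--         c = arrangement[i]
--         if c == '(' and i + 1 < n and arrangement[i + 1] == ')':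
--             # a "()" pair is a laser: it cuts every bar currently open
--             answer += stick
--             i += 2
--         elif c == '(':
--             stick += 1
--             i += 1
--         elif c == ')':
--             answer += 1
--             stick -= 1
--             i += 1
--         else:
--             answer += stick
--             i += 1
--     return answer
-- ===== Notes on version B (the rewrite author's own statement) =====
-- stated objective: alternative
-- what changed: B counts in a single index-advancing scan of the original string that consumes each open-close pair two characters at a time, instead of materialising the replaced string and folding over it; the replace call is kept only for the print side effect.
import Mathlib
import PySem

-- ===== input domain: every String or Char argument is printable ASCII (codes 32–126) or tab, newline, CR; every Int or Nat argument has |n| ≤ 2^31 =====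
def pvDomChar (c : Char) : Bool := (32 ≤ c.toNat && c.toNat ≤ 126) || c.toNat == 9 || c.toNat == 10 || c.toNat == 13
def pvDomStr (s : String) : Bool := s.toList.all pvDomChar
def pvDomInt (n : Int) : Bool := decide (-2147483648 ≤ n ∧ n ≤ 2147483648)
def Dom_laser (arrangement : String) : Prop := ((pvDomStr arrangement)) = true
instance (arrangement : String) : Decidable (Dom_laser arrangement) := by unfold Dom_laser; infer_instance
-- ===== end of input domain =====

-- B replaces A's fold over the "()"-replaced string by a single index-advancing scan of the
-- original string that consumes open-close pairs two characters at a time (alternative decomposition).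
-- Both programs print the replaced string; the equivalence proved here is about the return value.


-- ===== PORT A =====
-- the print is a side effect with no influence on the return value; it is not modelled
def laser (arrangement : String) : Int :=
  let las := PySem.Str.replace arrangement "()" "."
  (las.toList.foldl
    (fun (st : Int × Int) e =>
      if e = '(' then (st.1, st.2 + 1)
      else if e = ')' then (st.1 + 1, st.2 - 1)
      else (st.1 + st.2, st.2))
    (0, 0)).1

-- ===== PORT B =====
-- Source B's while loop: one scan of the original characters, consuming a "()" pair in one step
def laserAltGo : List Char → Int → Int → Int
  | [], answer, _ => answer
  | c :: rest, answer, stick =>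
    if c = '(' ∧ rest.head? = some ')' then laserAltGo rest.tail (answer + stick) stick
    else if c = '(' then laserAltGo rest answer (stick + 1)
    else if c = ')' then laserAltGo rest (answer + 1) (stick - 1)
    else laserAltGo rest (answer + stick) stick
  termination_by l _ _ => l.length
  decreasing_by all_goals (simp [List.length_tail]; try omega)

def laser_alt (arrangement : String) : Int :=
  laserAltGo arrangement.toList 0 0

-- ===== PRECONDITION & SPEC =====
def Spec_laser (arrangement : String) (out : Int) : Prop := out = laser_alt arrangement
instance (arrangement : String) (out : Int) : Decidable (Spec_laser arrangement out) := by unfold Spec_laser; infer_instance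

-- ===== CLAIM (what is proved, stated in full; the proofs are below) =====
def Claim_equal_laser : Prop := ∀ (arrangement : String), Dom_laser arrangement → Spec_laser arrangement (laser arrangement)

-- ===== LEMMAS AND PROOFS =====

-- the result of arrangement.replace("()", "."), as a structural recursion
def pyrep : List Char → List Char
  | [] => []
  | '(' :: ')' :: t => '.' :: pyrep t
  | c :: t => c :: pyrep t

theorem pyrep_cons (c : Char) (t : List Char) (h : ¬(c = '(' ∧ t.head? = some ')')) :
    pyrep (c :: t) = c :: pyrep t := by
  apply pyrep.eq_3
  intro t' hc ht
  exact h ⟨hc, by simp [ht]⟩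

theorem replace_go_eq (fuel : Nat) :
    ∀ (l acc : List Char), l.length ≤ fuel →
      PySem.Chars.replace.go ['(', ')'] ['.'] fuel l acc = acc.reverse ++ pyrep l := by
  induction fuel with
  | zero =>
    intro l acc h
    have : l = [] := by cases l <;> simp_all
    subst this
    simp [PySem.Chars.replace.go, pyrep]
  | succ n ih =>
    intro l acc h
    rcases l with _ | ⟨c, t⟩
    · simp [PySem.Chars.replace.go, pyrep]
    · rw [PySem.Chars.replace.go]
      by_cases hp : List.isPrefixOf ['(', ')'] (c :: t) = true
      · rw [if_pos hp]
        rcases t with _ | ⟨d, t'⟩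
        · simp [List.isPrefixOf] at hp
        · have hc : '(' = c ∧ ')' = d := by
            simpa [List.isPrefixOf] using hp
          obtain ⟨rfl, rfl⟩ := hc
          simp only [List.length_cons] at h
          rw [show List.drop (List.length ['(', ')']) ('(' :: ')' :: t') = t' by simp]
          rw [ih t' (['.'].reverse ++ acc) (by omega)]
          simp [pyrep]
      · rw [if_neg hp]
        simp only [List.length_cons] at h
        rw [ih t (c :: acc) (by omega)]
        have hnot : ¬(c = '(' ∧ t.head? = some ')') := by
          rintro ⟨rfl, hh⟩
          rcases t with _ | ⟨d, t'⟩
          · simp at hh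
          · simp at hh
            subst hh
            simp [List.isPrefixOf] at hp
        rw [pyrep_cons c t hnot]
        simp

theorem replace_eq_pyrep (l : List Char) :
    PySem.Chars.replace l ['(', ')'] ['.'] = pyrep l := by
  rw [PySem.Chars.replace]
  simp only [List.isEmpty_cons, if_false, Bool.false_eq_true]
  exact replace_go_eq l.length l [] (le_refl _)

theorem foldA_pyrep (l : List Char) : ∀ (answer stick : Int),
    ((pyrep l).foldl
      (fun (st : Int × Int) e =>
        if e = '(' then (st.1, st.2 + 1)
        else if e = ')' then (st.1 + 1, st.2 - 1)
        else (st.1 + st.2, st.2))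
      (answer, stick)).1 = laserAltGo l answer stick := by
  induction l using pyrep.induct with
  | case1 => intro answer stick; simp [pyrep, laserAltGo]
  | case2 t ih =>
    intro answer stick
    rw [pyrep, laserAltGo]
    simp [ih]
  | case3 c t hne ih =>
    intro answer stick
    have hnot : ¬(c = '(' ∧ t.head? = some ')') := by
      rintro ⟨rfl, hh⟩
      rcases t with _ | ⟨d, t'⟩
      · simp at hh
      · simp at hh
        exact hne t' rfl (by rw [hh])
    rw [pyrep_cons c t hnot, laserAltGo, if_neg hnot]
    simp only [List.foldl_cons]
    by_cases h1 : c = '('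
    · subst h1; simp [ih]
    · by_cases h2 : c = ')'
      · subst h2; simp [h1, ih]
      · simp [h1, h2, ih]

-- ===== VERDICT (by name: the statement is the Claim_ definition above) =====
theorem laser_spec : Claim_equal_laser := by
  intro arrangement _
  unfold Spec_laser laser laser_alt
  simp only [PySem.Str.toList_replace]
  rw [show ("()" : String).toList = ['(', ')'] from rfl,
      show ("." : String).toList = ['.'] from rfl]
  rw [replace_eq_pyrep]
  exact foldA_pyrep arrangement.toList 0 0
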